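-- pv_equiv track=rewrite | github.com/Sullofect/qso_cgm | core/leetcode.py | countBalancedClips
-- ===== SOURCE A (Python) =====
-- mod = 10 ** 9 + 7
--
-- def countBalancedClips(clipLength, diff):
--     # Initiate DP arrays for 26 characters in the alphabet
--     # curr = [0] * 26
--     prev = [1] * 26 # prev as the base case where all single letter clips are balanced
--
--     # Start iteration from 2 clips
--     for i in range(2, clipLength + 1):
--         curr = [0] * 26
--         for c1 in range(26):
--             for c2 in range(max(0, c1 - diff), min(25, c1 + diff) + 1):
--                 curr[c2] = (curr[c2] + prev[c1]) % mod
--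
--         prev = curr
--
--     return sum(curr) % mod
-- ===== SOURCE B (Python) =====
-- mod = 10 ** 9 + 7
--
-- def countBalancedClips(clipLength, diff):
--     # 26x26 transition matrix: M[r][c] = 1 iff letters r,c may be adjacent
--     M = [[1 if abs(r - c) <= diff else 0 for c in range(26)] for r in range(26)]
--     # result accumulator starts as the identity matrix
--     R = [[1 if r == c else 0 for c in range(26)] for r in range(26)]
--
--     def matmul(X, Y):
--         return [[sum(X[i][k] * Y[k][j] for k in range(26)) % mod for j in range(26)]
--                 for i in range(26)]
--
--     e = clipLength - 1
--     while e > 0: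
--         if e & 1:
--             R = matmul(R, M)
--         e >>= 1
--         if e:
--             M = matmul(M, M)
--
--     # answer = ones_vector^T * M^(clipLength-1) * ones_vector
--     return sum(sum(row) for row in R) % mod
-- ===== Notes on version B (the rewrite author's own statement) =====
-- stated objective: faster
-- what changed: Replaces the per-position banded DP sweep (clipLength-1 iterations of a 26x26 double loop) by binary exponentiation of the constant 26x26 transition matrix applied to the all-ones start vector.
import Mathlib
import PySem

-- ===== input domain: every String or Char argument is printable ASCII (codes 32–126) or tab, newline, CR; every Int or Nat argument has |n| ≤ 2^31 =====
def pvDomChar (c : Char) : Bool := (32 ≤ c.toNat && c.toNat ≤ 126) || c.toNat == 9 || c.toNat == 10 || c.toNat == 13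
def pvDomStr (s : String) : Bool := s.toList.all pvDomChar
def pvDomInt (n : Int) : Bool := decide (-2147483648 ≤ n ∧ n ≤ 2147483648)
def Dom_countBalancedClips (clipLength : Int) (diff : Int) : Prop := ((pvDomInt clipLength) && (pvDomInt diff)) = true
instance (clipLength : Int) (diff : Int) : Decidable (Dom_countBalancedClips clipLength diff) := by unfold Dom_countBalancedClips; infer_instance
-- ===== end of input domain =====

-- B replaces A's per-position banded DP sweep by binary exponentiation of the constant
-- 26x26 transition matrix (asymptotically faster: O(26^3 log n) vs O(26^2 n)).

def pvMod : Int := 10 ^ 9 + 7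

-- ===== PORT A =====
def countBalancedClips (clipLength : Int) (diff : Int) : Int :=
  -- prev = [1] * 26 ; for i in range(2, clipLength+1): … ; return sum(curr) % mod
  -- state = (prev, curr); curr before the first iteration is a dummy (Python leaves it
  -- undefined and raises NameError when the loop never runs — excluded by Pre_).
  let st := (PySem.List.pyRange 2 (clipLength + 1) 1).foldl
    (fun (st : List Int × List Int) (_i : Int) =>
      let curr := (PySem.List.pyRange 0 26 1).foldl
        (fun (curr : List Int) (c1 : Int) =>
          (PySem.List.pyRange (max 0 (c1 - diff)) (min 25 (c1 + diff) + 1) 1).foldl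
            (fun (curr : List Int) (c2 : Int) =>
              PySem.List.pySetD curr c2
                (PySem.Int.mod (PySem.List.pyGetD curr c2 0 + PySem.List.pyGetD st.1 c1 0) pvMod))
            curr)
        (List.replicate 26 0)
      (curr, curr))
    (List.replicate 26 1, List.replicate 26 0)
  PySem.Int.mod (st.2.foldl (· + ·) 0) pvMod

-- ===== PORT B =====
def pvMatmul (X Y : List (List Int)) : List (List Int) :=
  (PySem.List.pyRange 0 26 1).map (fun i =>
    (PySem.List.pyRange 0 26 1).map (fun j =>
      PySem.Int.mod
        ((PySem.List.pyRange 0 26 1).foldl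
          (fun s k =>
            s + PySem.List.pyGetD (PySem.List.pyGetD X i []) k 0 *
                PySem.List.pyGetD (PySem.List.pyGetD Y k []) j 0)
          0)
        pvMod))

-- while e > 0: if e & 1: R = R*M ; e >>= 1 ; if e: M = M*M    (e > 0 so e & 1 = e % 2)
def pvPowLoop (R M : List (List Int)) (e : Int) : List (List Int) :=
  if 0 < e then
    let R' := if PySem.Int.mod e 2 = 1 then pvMatmul R M else R
    let e' := PySem.Int.floordiv e 2
    let M' := if e' ≠ 0 then pvMatmul M M else M
    pvPowLoop R' M' e'
  else R
termination_by e.toNat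
decreasing_by
  rw [PySem.Int.floordiv_eq_ediv_of_pos (by omega)]
  omega

def countBalancedClips_alt (clipLength : Int) (diff : Int) : Int :=
  let M := (PySem.List.pyRange 0 26 1).map (fun r =>
    (PySem.List.pyRange 0 26 1).map (fun c => if |r - c| ≤ diff then (1 : Int) else 0))
  let I := (PySem.List.pyRange 0 26 1).map (fun r =>
    (PySem.List.pyRange 0 26 1).map (fun c => if r = c then (1 : Int) else 0))
  let R := pvPowLoop I M (clipLength - 1)
  PySem.Int.mod (R.foldl (fun s row => s + row.foldl (· + ·) 0) 0) pvMod

-- ===== PRECONDITION & SPEC =====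
-- Pre_ excludes clipLength < 2: there A's loop never runs and `sum(curr)` raises NameError.
def Pre_countBalancedClips (clipLength : Int) (diff : Int) : Prop := 2 ≤ clipLength
instance (clipLength : Int) (diff : Int) : Decidable (Pre_countBalancedClips clipLength diff) := by unfold Pre_countBalancedClips; infer_instance
def pvWitness_countBalancedClips : Int × Int := (3, 1)

def Spec_countBalancedClips (clipLength : Int) (diff : Int) (out : Int) : Prop := out = countBalancedClips_alt clipLength diff
instance (clipLength : Int) (diff : Int) (out : Int) : Decidable (Spec_countBalancedClips clipLength diff out) := by unfold Spec_countBalancedClips; infer_instance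

-- ===== CLAIM (what is proved, stated in full; the proofs are below) =====
def Claim_equal_countBalancedClips : Prop := ∀ (clipLength : Int) (diff : Int), Dom_countBalancedClips clipLength diff → Pre_countBalancedClips clipLength diff → Spec_countBalancedClips clipLength diff (countBalancedClips clipLength diff)


-- ===== LEMMAS AND PROOFS =====
def pvP : ℕ := 1000000007

lemma pvMod_eq : pvMod = ((pvP : ℕ) : ℤ) := by norm_num [pvMod, pvP]

lemma pvMod_pos : (0 : ℤ) < pvMod := by norm_num [pvMod]

lemma pv_cast_pymod (x : Int) : ((PySem.Int.mod x pvMod : Int) : ZMod pvP) = (x : ZMod pvP) := by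
  rw [PySem.Int.mod_eq_emod_of_pos pvMod_pos, pvMod_eq, ZMod.intCast_mod]

lemma pv_mod_eq_of_cast_eq {a b : Int} (h : (a : ZMod pvP) = (b : ZMod pvP)) :
    PySem.Int.mod a pvMod = PySem.Int.mod b pvMod := by
  rw [PySem.Int.mod_eq_emod_of_pos pvMod_pos, PySem.Int.mod_eq_emod_of_pos pvMod_pos, pvMod_eq]
  exact (ZMod.intCast_eq_intCast_iff a b pvP).mp h

-- abstract matrices over ZMod pvP
def pvGmat (X : List (List Int)) : Matrix (Fin 26) (Fin 26) (ZMod pvP) :=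
  Matrix.of fun i j => (((X.getD (i : ℕ) []).getD (j : ℕ) 0 : Int) : ZMod pvP)

def pvMspec (diff : Int) : Matrix (Fin 26) (Fin 26) (ZMod pvP) :=
  Matrix.of fun i j => if |((i : ℕ) : Int) - ((j : ℕ) : Int)| ≤ diff then 1 else 0

-- generic sum/fold cast lemmas
lemma pv_sum_map_getD {α : Type} (g : α → ZMod pvP) (d : α) :
    ∀ (L : List α), (L.map g).sum = ∑ j ∈ Finset.range L.length, g (L.getD j d) := by
  intro L
  induction L with
  | nil => simp
  | cons a L ih =>
    simp only [List.map_cons, List.sum_cons, List.length_cons, Finset.sum_range_succ',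
      List.getD_cons_succ, List.getD_cons_zero, ih]
    ring

lemma pv_sum_range_list (f : ℕ → ZMod pvP) : ∀ (n : ℕ),
    ((List.range n).map f).sum = ∑ i ∈ Finset.range n, f i := by
  intro n
  induction n with
  | zero => simp
  | succ n ih => rw [List.range_succ]; simp [Finset.sum_range_succ, ih]

lemma pv_cast_foldl_add {α : Type} (g : α → Int) :
    ∀ (l : List α) (s : Int),
      ((l.foldl (fun s c => s + g c) s : Int) : ZMod pvP)
        = (s : ZMod pvP) + (l.map (fun c => ((g c : Int) : ZMod pvP))).sum := by
  intro l
  induction l with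
  | nil => intro s; simp
  | cons a l ih =>
    intro s
    simp only [List.foldl_cons, List.map_cons, List.sum_cons, ih]
    push_cast
    ring

lemma pv_cast_sum (l : List Int) : ∀ (s : Int),
    ((l.foldl (· + ·) s : Int) : ZMod pvP)
      = (s : ZMod pvP) + (l.map (fun c : Int => ((c : Int) : ZMod pvP))).sum := by
  induction l with
  | nil => intro s; simp
  | cons a l ih =>
    intro s
    simp only [List.foldl_cons, List.map_cons, List.sum_cons, ih]
    push_cast
    ring

lemma pv_cast_foldl_condmod {α : Type} (C : α → Prop) [DecidablePred C] (g : α → Int) :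
    ∀ (l : List α) (s : Int),
      ((l.foldl (fun s c => if C c then PySem.Int.mod (s + g c) pvMod else s) s : Int) : ZMod pvP)
        = (s : ZMod pvP) + (l.map (fun c => if C c then ((g c : Int) : ZMod pvP) else 0)).sum := by
  intro l
  induction l with
  | nil => intro s; simp
  | cons a l ih =>
    intro s
    by_cases h : C a
    · simp only [List.foldl_cons, if_pos h, List.map_cons, List.sum_cons, ih, pv_cast_pymod]
      push_cast
      ring
    · simp only [List.foldl_cons, if_neg h, List.map_cons, List.sum_cons, ih]
      ring

-- length preservation through the scatter loops
lemma pv_foldl_set_length (f : List Int → Int → Int) :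
    ∀ (l : List Int) (cur : List Int),
      (l.foldl (fun cur c => PySem.List.pySetD cur c (f cur c)) cur).length = cur.length := by
  intro l
  induction l with
  | nil => intro cur; rfl
  | cons a l ih => intro cur; rw [List.foldl_cons, ih, PySem.List.length_pySetD]

-- the inner c2-loop: value at index j after scattering v over the window [lo, hi)
lemma pv_scatter_getD (v : Int) :
    ∀ (n : ℕ) (lo hi : Int), (hi - lo).toNat = n → 0 ≤ lo → hi ≤ 26 →
      ∀ (cur : List Int) (j : ℕ), cur.length = 26 → j < 26 →
        ((PySem.List.pyRange lo hi 1).foldl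
            (fun cur c2 => PySem.List.pySetD cur c2
              (PySem.Int.mod (PySem.List.pyGetD cur c2 0 + v) pvMod)) cur).getD j 0
          = if lo ≤ (j : Int) ∧ (j : Int) < hi
              then PySem.Int.mod (cur.getD j 0 + v) pvMod else cur.getD j 0 := by
  intro n
  induction n with
  | zero =>
    intro lo hi h0 hlo hhi cur j hc hj
    rw [PySem.List.pyRange_one_eq_nil (by omega), if_neg (by omega)]
    rfl
  | succ n ih =>
    intro lo hi h0 hlo hhi cur j hc hj
    have hlt : lo < hi := by omega
    rw [PySem.List.pyRange_one_cons hlt, List.foldl_cons]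
    have hset : PySem.List.pySetD cur lo (PySem.Int.mod (PySem.List.pyGetD cur lo 0 + v) pvMod)
        = cur.set lo.toNat (PySem.Int.mod (PySem.List.pyGetD cur lo 0 + v) pvMod) :=
      PySem.List.pySetD_of_nonneg _ _ hlo
    rw [hset, ih (lo + 1) hi (by omega) (by omega) hhi _ j (by rw [List.length_set]; exact hc) hj]
    by_cases hj_lo : (j : Int) = lo
    · rw [if_neg (by omega), if_pos (by omega)]
      have hjn : lo.toNat = j := by omega
      rw [hjn]
      have hgd : PySem.List.pyGetD cur lo 0 = cur.getD j 0 := by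
        rw [show lo = ((j : ℕ) : Int) by omega, PySem.List.pyGetD_natCast]
      rw [hgd, List.getD_eq_getElem?_getD, List.getElem?_set_self (by omega), Option.getD_some]
    · have hne : lo.toNat ≠ j := by omega
      rw [List.getD_eq_getElem?_getD, List.getElem?_set_ne hne, ← List.getD_eq_getElem?_getD]
      by_cases hcond : lo + 1 ≤ (j : Int) ∧ (j : Int) < hi
      · rw [if_pos hcond, if_pos (by omega)]
      · rw [if_neg hcond, if_neg (by omega)]

-- window condition as seen from index j
abbrev pvCond (diff : Int) (j : ℕ) (c1 : Int) : Prop :=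
  max 0 (c1 - diff) ≤ (j : Int) ∧ (j : Int) < min 25 (c1 + diff) + 1

-- the outer c1-loop, entrywise
lemma pv_outer_getD (diff : Int) (prev : List Int) :
    ∀ (cs : List Int) (cur : List Int) (j : ℕ), cur.length = 26 → j < 26 →
      (cs.foldl (fun cur c1 =>
          (PySem.List.pyRange (max 0 (c1 - diff)) (min 25 (c1 + diff) + 1) 1).foldl
            (fun cur c2 => PySem.List.pySetD cur c2
              (PySem.Int.mod (PySem.List.pyGetD cur c2 0 + PySem.List.pyGetD prev c1 0) pvMod))
            cur) cur).getD j 0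
        = cs.foldl (fun s c1 => if pvCond diff j c1
            then PySem.Int.mod (s + PySem.List.pyGetD prev c1 0) pvMod else s) (cur.getD j 0) := by
  intro cs
  induction cs with
  | nil => intro cur j hc hj; rfl
  | cons a cs ih =>
    intro cur j hc hj
    rw [List.foldl_cons, List.foldl_cons]
    have hlen : ((PySem.List.pyRange (max 0 (a - diff)) (min 25 (a + diff) + 1) 1).foldl
        (fun cur c2 => PySem.List.pySetD cur c2
          (PySem.Int.mod (PySem.List.pyGetD cur c2 0 + PySem.List.pyGetD prev a 0) pvMod))
        cur).length = 26 := by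
      rw [pv_foldl_set_length]; exact hc
    have hinner := pv_scatter_getD (PySem.List.pyGetD prev a 0)
      ((min 25 (a + diff) + 1 - max 0 (a - diff)).toNat) (max 0 (a - diff))
      (min 25 (a + diff) + 1) rfl (le_max_left 0 _) (by omega) cur j hc hj
    rw [ih _ j hlen hj, hinner]

-- one DP step of A, as a function of prev (matches A's loop body on st.1)
def pvStep (diff : Int) (prev : List Int) : List Int :=
  (PySem.List.pyRange 0 26 1).foldl
    (fun (curr : List Int) (c1 : Int) =>
      (PySem.List.pyRange (max 0 (c1 - diff)) (min 25 (c1 + diff) + 1) 1).foldl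
        (fun (curr : List Int) (c2 : Int) =>
          PySem.List.pySetD curr c2
            (PySem.Int.mod (PySem.List.pyGetD curr c2 0 + PySem.List.pyGetD prev c1 0) pvMod))
        curr)
    (List.replicate 26 0)

lemma pv_step_length (diff : Int) (prev : List Int) : (pvStep diff prev).length = 26 := by
  unfold pvStep
  have : ∀ (cs : List Int) (cur : List Int),
      (cs.foldl (fun cur c1 =>
        (PySem.List.pyRange (max 0 (c1 - diff)) (min 25 (c1 + diff) + 1) 1).foldl
          (fun cur c2 => PySem.List.pySetD cur c2
            (PySem.Int.mod (PySem.List.pyGetD cur c2 0 + PySem.List.pyGetD prev c1 0) pvMod))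
          cur) cur).length = cur.length := by
    intro cs
    induction cs with
    | nil => intro cur; rfl
    | cons a cs ih => intro cur; rw [List.foldl_cons, ih, pv_foldl_set_length]
  rw [this]
  simp

lemma pv_step_cast (diff : Int) (prev : List Int) (j : Fin 26) :
    (((pvStep diff prev).getD (j : ℕ) 0 : Int) : ZMod pvP)
      = ∑ i : Fin 26, pvMspec diff j i * ((prev.getD (i : ℕ) 0 : Int) : ZMod pvP) := by
  unfold pvStep
  rw [pv_outer_getD diff prev _ _ (j : ℕ) (by simp) j.isLt]
  rw [List.getD_replicate (0 : ℤ) j.isLt]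
  rw [pv_cast_foldl_condmod (pvCond diff (j : ℕ)) (fun c1 => PySem.List.pyGetD prev c1 0)]
  rw [PySem.List.pyRange_zero, show ((26 : ℤ).toNat) = 26 from rfl, List.map_map,
    pv_sum_range_list, ← Fin.sum_univ_eq_sum_range]
  simp only [Int.cast_zero, zero_add, Function.comp]
  apply Finset.sum_congr rfl
  intro i _
  have hcond : pvCond diff (j : ℕ) ((i : ℕ) : Int) ↔ |((j : ℕ) : Int) - ((i : ℕ) : Int)| ≤ diff := by
    unfold pvCond
    rw [abs_le]
    have hi := i.isLt
    have hj := j.isLt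
    omega
  rw [PySem.List.pyGetD_natCast]
  unfold pvMspec
  by_cases h : |((j : ℕ) : Int) - ((i : ℕ) : Int)| ≤ diff
  · rw [if_pos (hcond.mpr h)]
    simp [Matrix.of_apply, if_pos h]
  · rw [if_neg (fun hc => h (hcond.mp hc))]
    simp [Matrix.of_apply, if_neg h]

def pvOnes : Fin 26 → ZMod pvP := fun _ => 1

lemma pv_iter_length (diff : Int) : ∀ (k : ℕ),
    ((pvStep diff)^[k] (List.replicate 26 1)).length = 26 := by
  intro k
  induction k with
  | zero => simp
  | succ k ih => rw [Function.iterate_succ_apply', pv_step_length]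

lemma pv_iter_cast (diff : Int) : ∀ (k : ℕ) (j : Fin 26),
    ((((pvStep diff)^[k] (List.replicate 26 1)).getD (j : ℕ) 0 : Int) : ZMod pvP)
      = ((pvMspec diff) ^ k).mulVec pvOnes j := by
  intro k
  induction k with
  | zero =>
    intro j
    rw [Function.iterate_zero_apply, List.getD_replicate (1 : ℤ) j.isLt]
    simp [Matrix.one_mulVec, pvOnes]
  | succ k ih =>
    intro j
    rw [Function.iterate_succ_apply', pv_step_cast diff _ j]
    have : ∀ i : Fin 26, (((( pvStep diff)^[k] (List.replicate 26 1)).getD (i : ℕ) 0 : Int) : ZMod pvP)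
        = ((pvMspec diff) ^ k).mulVec pvOnes i := ih
    simp only [this]
    rw [pow_succ', ← Matrix.mulVec_mulVec]
    simp [Matrix.mulVec, dotProduct]

-- the outer foldl of A iterates pvStep on the first component
lemma pv_foldl_iterate (f : List Int × List Int → Int → List Int × List Int)
    (g : List Int → List Int) (hf : ∀ st i, f st i = (g st.1, g st.1)) :
    ∀ (l : List Int) (st : List Int × List Int), l ≠ [] →
      l.foldl f st = (g^[l.length] st.1, g^[l.length] st.1) := by
  intro l
  induction l with
  | nil => intro st h; exact absurd rfl h
  | cons a l ih =>
    intro st _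
    rw [List.foldl_cons, hf]
    by_cases h : l = []
    · subst h; simp
    · rw [ih _ h]
      simp [Function.iterate_succ_apply]

-- ===== B-side lemmas =====
lemma pv_getD_map26 {β : Type} (f : Int → β) (d : β) (i : ℕ) (hi : i < 26) :
    (((PySem.List.pyRange 0 26 1).map f).getD i d) = f ((i : ℕ) : Int) := by
  rw [PySem.List.pyRange_zero, show ((26 : ℤ).toNat) = 26 from rfl, List.map_map,
    List.getD_eq_getElem?_getD]
  simp [hi]

lemma pv_matmul_g (X Y : List (List Int)) :
    pvGmat (pvMatmul X Y) = pvGmat X * pvGmat Y := by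
  ext i j
  unfold pvGmat pvMatmul
  rw [Matrix.mul_apply]
  simp only [Matrix.of_apply]
  rw [pv_getD_map26 _ _ (i : ℕ) i.isLt, pv_getD_map26 _ _ (j : ℕ) j.isLt, pv_cast_pymod]
  rw [pv_cast_foldl_add (fun k => PySem.List.pyGetD (PySem.List.pyGetD X ((i:ℕ):Int) []) k 0 *
        PySem.List.pyGetD (PySem.List.pyGetD Y k []) ((j:ℕ):Int) 0)]
  rw [PySem.List.pyRange_zero, show ((26 : ℤ).toNat) = 26 from rfl, List.map_map,
    pv_sum_range_list, ← Fin.sum_univ_eq_sum_range]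
  simp only [Int.cast_zero, zero_add, Function.comp]
  apply Finset.sum_congr rfl
  intro k _
  push_cast
  simp [PySem.List.pyGetD_natCast]

set_option maxHeartbeats 1600000 in
lemma pv_powloop : ∀ (n : ℕ) (R M : List (List Int)) (e : Int), e.toNat ≤ n →
    pvGmat (pvPowLoop R M e) = pvGmat R * (pvGmat M) ^ e.toNat := by
  intro n
  induction n with
  | zero =>
    intro R M e he
    rw [pvPowLoop, if_neg (by omega)]
    rw [show e.toNat = 0 by omega, pow_zero, mul_one]
  | succ n ih =>
    intro R M e he
    rw [pvPowLoop]
    by_cases hpos : 0 < e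
    · rw [if_pos hpos]
      have hm2 : PySem.Int.mod e 2 = e % 2 := PySem.Int.mod_eq_emod_of_pos (by omega)
      have hfd : PySem.Int.floordiv e 2 = e / 2 := PySem.Int.floordiv_eq_ediv_of_pos (by omega)
      simp only [hm2, hfd]
      show pvGmat (pvPowLoop (if e % 2 = 1 then pvMatmul R M else R)
          (if e / 2 ≠ 0 then pvMatmul M M else M) (e / 2)) = pvGmat R * pvGmat M ^ e.toNat
      rw [ih _ _ (e / 2) (by omega)]
      have hsplit : e.toNat = 2 * (e / 2).toNat + (e % 2).toNat := by omega
      by_cases hz : e / 2 = 0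
      · have h1 : e = 1 := by omega
        subst h1
        rw [if_pos (by decide : (1 : ℤ) % 2 = 1), if_neg (by decide : ¬((1 : ℤ) / 2 ≠ 0)),
          show ((1 : ℤ) / 2).toNat = 0 by decide, pow_zero, mul_one,
          show (1 : ℤ).toNat = 1 by decide, pow_one]
        exact pv_matmul_g R M
      · rw [if_pos hz, pv_matmul_g]
        have hpow : (pvGmat M * pvGmat M) ^ (e / 2).toNat = pvGmat M ^ (2 * (e / 2).toNat) := by
          rw [← sq, ← pow_mul]
        by_cases h2 : e % 2 = 1
        · rw [if_pos h2, pv_matmul_g, hpow,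
            show e.toNat = 2 * (e / 2).toNat + 1 by omega, pow_succ, mul_assoc, pow_mul_comm']
        · rw [if_neg h2, hpow, show e.toNat = 2 * (e / 2).toNat by omega]
    · rw [if_neg hpos]
      rw [show e.toNat = 0 by omega, pow_zero, mul_one]

-- shapes: pvMatmul always returns a 26 x 26 list
def pvShape (X : List (List Int)) : Prop := X.length = 26 ∧ ∀ r ∈ X, r.length = 26

lemma pv_matmul_shape (X Y : List (List Int)) : pvShape (pvMatmul X Y) := by
  constructor
  · unfold pvMatmul
    rw [List.length_map, PySem.List.length_pyRange_one]
    rfl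
  · intro r hr
    unfold pvMatmul at hr
    rw [List.mem_map] at hr
    obtain ⟨i, _, hri⟩ := hr
    rw [← hri, List.length_map, PySem.List.length_pyRange_one]
    rfl

set_option maxHeartbeats 1600000 in
lemma pv_powloop_shape : ∀ (n : ℕ) (R M : List (List Int)) (e : Int), e.toNat ≤ n →
    pvShape R → pvShape (pvPowLoop R M e) := by
  intro n
  induction n with
  | zero =>
    intro R M e he hR
    rw [pvPowLoop, if_neg (by omega)]
    exact hR
  | succ n ih =>
    intro R M e he hR
    rw [pvPowLoop]
    by_cases hpos : 0 < e
    · rw [if_pos hpos]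
      have hfd : PySem.Int.floordiv e 2 = e / 2 := PySem.Int.floordiv_eq_ediv_of_pos (by omega)
      simp only [hfd]
      show pvShape (pvPowLoop (if PySem.Int.mod e 2 = 1 then pvMatmul R M else R)
          (if e / 2 ≠ 0 then pvMatmul M M else M) (e / 2))
      apply ih _ _ (e / 2) (by omega)
      by_cases h2 : PySem.Int.mod e 2 = 1
      · rw [if_pos h2]; exact pv_matmul_shape R M
      · rw [if_neg h2]; exact hR
    · rw [if_neg hpos]; exact hR

lemma pv_shape_row (X : List (List Int)) (hs : pvShape X) (i : ℕ) (hi : i < 26) :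
    (X.getD i []).length = 26 := by
  obtain ⟨hl, hr⟩ := hs
  have hmem : X.getD i [] ∈ X := by
    rw [List.getD_eq_getElem?_getD, List.getElem?_eq_getElem (by omega), Option.getD_some]
    exact List.getElem_mem _
  exact hr _ hmem

-- total of all entries of a shaped matrix list, cast to ZMod
lemma pv_cast_total (X : List (List Int)) (hs : pvShape X) :
    ((X.foldl (fun s row => s + row.foldl (· + ·) 0) 0 : Int) : ZMod pvP)
      = ∑ i : Fin 26, ∑ j : Fin 26, pvGmat X i j := by
  rw [pv_cast_foldl_add (fun row : List Int => row.foldl (· + ·) 0)]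
  rw [pv_sum_map_getD _ ([] : List Int), hs.1, ← Fin.sum_univ_eq_sum_range]
  simp only [Int.cast_zero, zero_add]
  apply Finset.sum_congr rfl
  intro i _
  rw [pv_cast_sum, pv_sum_map_getD _ (0 : Int), pv_shape_row X hs (i : ℕ) i.isLt,
    ← Fin.sum_univ_eq_sum_range]
  simp [pvGmat]

-- initial matrices of B
lemma pv_g_ident :
    pvGmat ((PySem.List.pyRange 0 26 1).map (fun r =>
      (PySem.List.pyRange 0 26 1).map (fun c => if r = c then (1 : Int) else 0))) = 1 := by
  ext i j
  unfold pvGmat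
  simp only [Matrix.of_apply]
  rw [pv_getD_map26 _ _ (i : ℕ) i.isLt, pv_getD_map26 _ _ (j : ℕ) j.isLt]
  rw [Matrix.one_apply]
  by_cases h : i = j
  · rw [if_pos (by exact_mod_cast congrArg (fun x : Fin 26 => ((x : ℕ) : Int)) h), if_pos h]
    simp
  · rw [if_neg (by intro hc; apply h; ext; exact_mod_cast hc), if_neg h]
    simp

lemma pv_g_M (diff : Int) :
    pvGmat ((PySem.List.pyRange 0 26 1).map (fun r =>
      (PySem.List.pyRange 0 26 1).map (fun c => if |r - c| ≤ diff then (1 : Int) else 0)))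
      = pvMspec diff := by
  ext i j
  unfold pvGmat pvMspec
  simp only [Matrix.of_apply]
  rw [pv_getD_map26 _ _ (i : ℕ) i.isLt, pv_getD_map26 _ _ (j : ℕ) j.isLt]
  by_cases h : |((i : ℕ) : Int) - ((j : ℕ) : Int)| ≤ diff
  · rw [if_pos h, if_pos h]; simp
  · rw [if_neg h, if_neg h]; simp

lemma pv_shape_ident :
    pvShape ((PySem.List.pyRange 0 26 1).map (fun r =>
      (PySem.List.pyRange 0 26 1).map (fun c => if r = c then (1 : Int) else 0))) := by
  constructor
  · rw [List.length_map, PySem.List.length_pyRange_one]; rfl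
  · intro r hr
    rw [List.mem_map] at hr
    obtain ⟨x, _, hx⟩ := hr
    rw [← hx, List.length_map, PySem.List.length_pyRange_one]; rfl

-- A's value, via the abstract model
lemma pv_A_cast (clipLength diff : Int) (h2 : 2 ≤ clipLength) :
    countBalancedClips clipLength diff
      = PySem.Int.mod
          (((pvStep diff)^[(clipLength - 1).toNat] (List.replicate 26 1)).foldl (· + ·) 0) pvMod := by
  have hne : PySem.List.pyRange 2 (clipLength + 1) 1 ≠ [] := by
    rw [PySem.List.pyRange_one_cons (by omega)]
    simp
  unfold countBalancedClips
  show PySem.Int.mod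
      (((PySem.List.pyRange 2 (clipLength + 1) 1).foldl
          (fun (st : List Int × List Int) (_i : Int) => (pvStep diff st.1, pvStep diff st.1))
          (List.replicate 26 1, List.replicate 26 0)).2.foldl (· + ·) 0) pvMod = _
  rw [pv_foldl_iterate _ (pvStep diff) (fun st i => rfl) _ _ hne]
  rw [PySem.List.length_pyRange_one,
    show (clipLength + 1 - 2).toNat = (clipLength - 1).toNat by omega]

-- ===== VERDICT (by name: the statement is the Claim_ definition above) =====
theorem countBalancedClips_spec : Claim_equal_countBalancedClips := by
  intro clipLength diff _ hpre
  unfold Pre_countBalancedClips at hpre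
  unfold Spec_countBalancedClips
  rw [pv_A_cast clipLength diff hpre]
  simp only [countBalancedClips_alt]
  apply pv_mod_eq_of_cast_eq
  rw [pv_cast_sum, pv_sum_map_getD _ (0 : Int), pv_iter_length, ← Fin.sum_univ_eq_sum_range]
  rw [pv_cast_total _ (pv_powloop_shape _ _ _ _ le_rfl pv_shape_ident)]
  rw [pv_powloop _ _ _ _ le_rfl, pv_g_ident, pv_g_M diff, one_mul]
  simp only [Int.cast_zero, zero_add]
  apply Finset.sum_congr rfl
  intro j _
  rw [pv_iter_cast]
  simp [Matrix.mulVec, dotProduct, pvOnes]
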